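-- pv_equiv track=rewrite | github.com/lza6/claw-code-tingfeng | src/tools_runtime/edit_parser.py | perfect_replace
-- ===== SOURCE A (Python) =====
-- def perfect_replace(
--     chunks: list[str],
--     content_lines: list[str],
-- ) -> str | None:
--     """精确行匹配替换
--
--     使用滑动窗口在 content_lines 中查找与 chunks 完全匹配的子序列。
--
--     参数:
--         chunks: 要搜索的行列表
--         content_lines: 文件内容行列表
--
--     返回:
--         替换后的内容，或 None（未找到匹配）
--     """
--     if not chunks:
--         return None
--
--     chunk_count = len(chunks)
--     for i in range(len(content_lines) - chunk_count + 1):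
--         if content_lines[i:i + chunk_count] == chunks:
--             # 找到匹配，去除这些行
--             remaining = content_lines[:i] + content_lines[i + chunk_count:]
--             return ''.join(remaining)
--
--     return None
-- ===== SOURCE B (Python) =====
-- def _matches_at(chunks, lines, i):
--     if len(lines) - i < len(chunks):
--         return False
--     for j, c in enumerate(chunks):
--         if lines[i + j] != c:
--             return False
--     return True
--
--
-- def perfect_replace(chunks, content_lines):
--     """Single left-to-right pass with a prefix accumulator and an early-exit
--     element-wise match test; on a hit, join accumulator + remaining tail."""
--     if not chunks:
--         return None
--     k = len(chunks)
--     prefix = []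
--     for i, line in enumerate(content_lines):
--         if _matches_at(chunks, content_lines, i):
--             return ''.join(prefix + content_lines[i + k:])
--         prefix.append(line)
--     return None
-- ===== Notes on version B (the rewrite author's own statement) =====
-- stated objective: alternative
-- what changed: Replaces A's index loop with slice-compare and two-sided slice rebuild by a single pass that accumulates the prefix incrementally, tests each position with an early-exit element-wise match, and joins accumulator plus remaining tail on a hit.
import Mathlib
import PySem

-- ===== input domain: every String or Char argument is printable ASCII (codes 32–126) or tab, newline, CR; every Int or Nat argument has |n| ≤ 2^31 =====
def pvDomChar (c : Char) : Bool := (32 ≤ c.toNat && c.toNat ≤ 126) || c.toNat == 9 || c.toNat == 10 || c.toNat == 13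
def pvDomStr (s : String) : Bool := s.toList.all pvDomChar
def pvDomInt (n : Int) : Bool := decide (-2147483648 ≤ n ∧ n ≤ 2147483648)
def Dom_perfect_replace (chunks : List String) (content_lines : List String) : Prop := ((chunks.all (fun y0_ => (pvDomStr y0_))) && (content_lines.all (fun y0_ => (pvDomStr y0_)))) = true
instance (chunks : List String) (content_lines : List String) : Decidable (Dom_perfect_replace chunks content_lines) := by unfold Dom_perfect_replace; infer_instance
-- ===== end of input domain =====

-- B replaces A's slice-compare index loop by a single pass with an incremental prefix
-- accumulator and an early-exit element-wise match (alternative decomposition, same cost).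

-- ===== PORT A =====
-- A: index loop over range(len(content)-k+1), slice-compare at each index,
-- rebuild the result by slicing both sides of the match.
def pvALoop (chunks : List String) (content : List String) : List Int → Option String
  | [] => none
  | i :: is =>
    if PySem.List.slice content (some i) (some (i + PySem.List.len chunks)) = chunks then
      some (PySem.Str.join "" (PySem.List.slice content none (some i) ++
            PySem.List.slice content (some (i + PySem.List.len chunks)) none))
    else pvALoop chunks content is

def perfect_replace (chunks : List String) (content_lines : List String) : Option String :=
  if chunks = [] then none
  else pvALoop chunks content_lines
    (PySem.List.pyRange 0 (PySem.List.len content_lines - PySem.List.len chunks + 1) 1)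

-- ===== PORT B =====
-- B: single suffix walk with a prefix accumulator (kept reversed, reversed at use,
-- the standard port of Python's append loop) and an early-exit prefix check.
def pvStartsWith (chunks : List String) (rest : List String) : Bool :=
  decide (PySem.List.len chunks ≤ PySem.List.len rest) &&
    (chunks.zip rest).all (fun p => p.1 == p.2)

def pvBGo (chunks : List String) (acc : List String) : List String → Option String
  | [] => none
  | l :: rs =>
    if pvStartsWith chunks (l :: rs) then
      some (PySem.Str.join "" (acc.reverse ++ (l :: rs).drop chunks.length))
    else pvBGo chunks (l :: acc) rs

def perfect_replace_alt (chunks : List String) (content_lines : List String) : Option String :=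
  if chunks = [] then none else pvBGo chunks [] content_lines

-- ===== PRECONDITION & SPEC =====
def Spec_perfect_replace (chunks : List String) (content_lines : List String) (out : Option String) : Prop := out = perfect_replace_alt chunks content_lines
instance (chunks : List String) (content_lines : List String) (out : Option String) : Decidable (Spec_perfect_replace chunks content_lines out) := by unfold Spec_perfect_replace; infer_instance

-- ===== CLAIM (what is proved, stated in full; the proofs are below) =====
def Claim_equal_perfect_replace : Prop := ∀ (chunks : List String) (content_lines : List String), Dom_perfect_replace chunks content_lines → Spec_perfect_replace chunks content_lines (perfect_replace chunks content_lines)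

-- ===== LEMMAS AND PROOFS =====

-- the element-wise early-exit prefix check is exactly isPrefixOf
theorem pvStartsWith_eq (chunks rest : List String) :
    pvStartsWith chunks rest = chunks.isPrefixOf rest := by
  induction chunks generalizing rest with
  | nil => simp [pvStartsWith, List.isPrefixOf]
  | cons c cs ih =>
    cases rest with
    | nil => simp [pvStartsWith, List.isPrefixOf]
    | cons r rs =>
      simp only [pvStartsWith, List.isPrefixOf, PySem.List.len_eq, List.length_cons,
        List.zip_cons_cons, List.all_cons] at *
      rw [← ih rs]
      simp [Bool.and_left_comm]

theorem pvBGo_short (chunks : List String) :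
    ∀ (rest acc : List String), rest.length < chunks.length → pvBGo chunks acc rest = none := by
  intro rest
  induction rest with
  | nil => intro acc h; simp [pvBGo]
  | cons l rs ih =>
    intro acc h
    have hpre : pvStartsWith chunks (l :: rs) = false := by
      rw [pvStartsWith_eq]
      rw [Bool.eq_false_iff]
      intro hc
      have := (List.isPrefixOf_iff_prefix.mp hc).length_le
      simp only [List.length_cons] at this h
      omega
    simp only [pvBGo, hpre, Bool.false_eq_true, if_false]
    exact ih (l :: acc) (by simp only [List.length_cons] at h; omega)

theorem pvMain (chunks : List String) (hk : chunks ≠ []) (content : List String) :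
    ∀ (rest acc : List String), content = acc.reverse ++ rest →
      pvALoop chunks content
        (PySem.List.pyRange (acc.length : Int)
          ((content.length : Int) - chunks.length + 1) 1)
      = pvBGo chunks acc rest := by
  have hk1 : 1 ≤ chunks.length := by
    cases chunks with
    | nil => exact absurd rfl hk
    | cons a as => simp
  intro rest
  induction rest with
  | nil =>
    intro acc hcont
    have hlen : content.length = acc.length := by simp [hcont]
    rw [PySem.List.pyRange_one_eq_nil (by rw [hlen]; omega)]
    simp [pvALoop, pvBGo]
  | cons l rs ih =>
    intro acc hcont
    have hlen : content.length = acc.length + (rs.length + 1) := by simp [hcont]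
    by_cases hpre : chunks.isPrefixOf (l :: rs)
    · -- match here: the range is nonempty at index acc.length
      have hple : chunks.length ≤ rs.length + 1 := by
        have := (List.isPrefixOf_iff_prefix.mp hpre).length_le
        simpa using this
      rw [PySem.List.pyRange_one_cons (by omega)]
      have hdrop : content.drop acc.length = l :: rs := by
        rw [hcont, ← List.length_reverse (as := acc), List.drop_left]
      have htake : content.take acc.length = acc.reverse := by
        rw [hcont, ← List.length_reverse (as := acc), List.take_left]
      have hslice : PySem.List.slice content (some (acc.length : Int))
          (some ((acc.length : Int) + (chunks.length : Int))) = chunks := by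
        rw [PySem.List.slice_natCast_add, hdrop]
        exact ((List.prefix_iff_eq_take.mp (List.isPrefixOf_iff_prefix.mp hpre))).symm
      simp only [pvALoop, PySem.List.len_eq, hslice, pvBGo,
        pvStartsWith_eq, hpre, if_pos]
      congr 1
      rw [PySem.List.slice_to_natCast, htake]
      have : (acc.length : Int) + (chunks.length : Int) = ((acc.length + chunks.length : Nat) : Int) := by push_cast; ring
      rw [this, PySem.List.slice_from_natCast]
      rw [← List.drop_drop, hdrop]
    · by_cases hroom : chunks.length ≤ rs.length + 1
      · -- no match here, room remains: step both sides
        rw [PySem.List.pyRange_one_cons (by rw [hlen]; omega)]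
        have hdrop : content.drop acc.length = l :: rs := by
          rw [hcont, ← List.length_reverse (as := acc), List.drop_left]
        have hslice : PySem.List.slice content (some (acc.length : Int))
            (some ((acc.length : Int) + (chunks.length : Int))) ≠ chunks := by
          rw [PySem.List.slice_natCast_add, hdrop]
          intro he
          exact hpre (List.isPrefixOf_iff_prefix.mpr (List.prefix_iff_eq_take.mpr he.symm))
        simp only [pvALoop, PySem.List.len_eq, hslice, pvBGo,
          pvStartsWith_eq, hpre, Bool.false_eq_true, if_false]
        have hacc : ((acc.length : Int) + 1) = (((l :: acc).length : Nat) : Int) := by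
          push_cast; simp
        rw [hacc]
        exact ih (l :: acc) (by simp [hcont])
      · -- too little room: the range is empty and B keeps failing the check
        rw [PySem.List.pyRange_one_eq_nil (by rw [hlen]; omega)]
        have := pvBGo_short chunks (l :: rs) acc (by simp; omega)
        simp only [pvALoop, this]

-- ===== VERDICT (by name: the statement is the Claim_ definition above) =====
theorem perfect_replace_spec : Claim_equal_perfect_replace := by
  intro chunks content_lines _
  unfold Spec_perfect_replace perfect_replace perfect_replace_alt
  by_cases hk : chunks = []
  · simp [hk]
  · simp only [if_neg hk]
    have := pvMain chunks hk content_lines content_lines [] (by simp)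
    simpa [PySem.List.len_eq] using this
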